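-- pv_equiv track=rewrite | github.com/Atix95/Advent-of-Code-2021 | day_15/day_15.py | find_path_with_lowest_risk
-- ===== SOURCE A (Python) =====
-- from collections import defaultdict
--
-- DIRECTIONS = [(0, 1), (1, 0), (-1, 0), (0, -1)]
--
-- def neighbours(position, visited_nodes, nodes_to_visit, risk_levels):
--     x, y = position
--
--     for dx, dy in DIRECTIONS:
--         if (
--             0 <= x + dx <= x_max(risk_levels)
--             and 0 <= y + dy <= y_max(risk_levels)
--             and (x + dx, y + dy) not in visited_nodes
--             and (x + dx, y + dy) not in nodes_to_visit
--         ):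
--             yield (x + dx, y + dy)
--
--     return []
--
-- def x_max(risk_levels):
--     return len(risk_levels[0]) - 1
--
-- def y_max(risk_levels):
--     return len(risk_levels) - 1
--
-- def find_path_with_lowest_risk(risk_levels):
--     destination = (x_max(risk_levels), y_max(risk_levels))
--
--     node_risks = defaultdict(lambda: float("inf"))
--     node_risks[(0, 0)] = 0
--
--     nodes_to_visit = []
--     visited_nodes = []
--     nodes_to_visit.append((0, 0))
--
--     while len(nodes_to_visit) > 0:
--         risks_nodes_to_visit = []
--
--         for nodes in nodes_to_visit:
--             risks_nodes_to_visit.append(node_risks[nodes])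
--
--         current_risk = min(risks_nodes_to_visit)
--         x, y = nodes_to_visit[risks_nodes_to_visit.index(current_risk)]
--
--         if (x, y) == destination:
--             break
--
--         for neighbour_pos in neighbours(
--             (x, y), visited_nodes, nodes_to_visit, risk_levels
--         ):
--             nodes_to_visit.append(neighbour_pos)
--             if (
--                 current_risk + risk_levels[neighbour_pos[1]][neighbour_pos[0]]
--                 < node_risks[neighbour_pos]
--             ):
--                 node_risks[neighbour_pos] = (
--                     current_risk + risk_levels[neighbour_pos[1]][neighbour_pos[0]]
--                 )
--
--         visited_nodes.append((x, y))
--         nodes_to_visit.remove((x, y))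
--
--     return node_risks[destination]
-- ===== SOURCE B (Python) =====
-- # B: Dijkstra with a risk-sorted frontier (stable insertion) and a seen-set,
-- # instead of A's per-iteration full scan over an unsorted frontier plus a risk dict.
-- DIRECTIONS = [(0, 1), (1, 0), (-1, 0), (0, -1)]
--
-- def find_path_with_lowest_risk(risk_levels):
--     x_last = len(risk_levels[0]) - 1
--     y_last = len(risk_levels) - 1
--     # frontier: (risk, (x, y)) pairs, nondecreasing risk, ties in insertion order
--     frontier = [(0, (0, 0))]
--     seen = {(0, 0)}
--     while frontier:
--         risk, (x, y) = frontier.pop(0)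
--         if (x, y) == (x_last, y_last):
--             return risk
--         for dx, dy in DIRECTIONS:
--             nx, ny = x + dx, y + dy
--             if 0 <= nx <= x_last and 0 <= ny <= y_last and (nx, ny) not in seen:
--                 seen.add((nx, ny))
--                 new_risk = risk + risk_levels[ny][nx]
--                 i = 0
--                 while i < len(frontier) and frontier[i][0] <= new_risk:
--                     i += 1
--                 frontier.insert(i, (new_risk, (nx, ny)))
--     return 0  # unreachable: the grid box is connected, so the destination is always popped
-- ===== Notes on version B (the rewrite author's own statement) =====
-- stated objective: faster
-- what changed: A rescans the whole unsorted frontier every iteration (rebuilds a risk list, min, index, remove) and tests membership by scanning two plain lists; B keeps the frontier as a list sorted by risk (stable insertion, O(1) pop of the minimum), a hash set of discovered cells, and carries each cell's risk inside the frontier entry so the risk dict disappears.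
-- outside the precondition, e.g. on find_path_with_lowest_risk([[]]): A returns inf, B returns 0; on find_path_with_lowest_risk([[0, 0, 100], [0, 100], [0, 0, 0]]): A returns 0, B returns 0
import Mathlib
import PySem

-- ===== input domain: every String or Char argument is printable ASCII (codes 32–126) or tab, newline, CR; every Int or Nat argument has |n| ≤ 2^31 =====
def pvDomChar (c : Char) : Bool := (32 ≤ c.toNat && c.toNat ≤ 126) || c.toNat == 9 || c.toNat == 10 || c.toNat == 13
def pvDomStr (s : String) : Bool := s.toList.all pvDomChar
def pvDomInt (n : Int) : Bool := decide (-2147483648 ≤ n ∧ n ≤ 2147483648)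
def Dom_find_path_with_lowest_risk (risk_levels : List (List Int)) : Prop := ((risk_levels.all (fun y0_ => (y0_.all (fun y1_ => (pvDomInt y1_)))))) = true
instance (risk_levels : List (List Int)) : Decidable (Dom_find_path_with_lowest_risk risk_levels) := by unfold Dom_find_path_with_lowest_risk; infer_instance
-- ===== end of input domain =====

-- B replaces A's per-iteration frontier rescans (risk list, min, index, remove, list membership)
-- by a risk-sorted frontier with O(1) pop of the minimum, a seen-set and no risk dict: faster.


-- ===== PORT A =====

-- DIRECTIONS (module constant, shared verbatim by both Pythons)
def pvDirs : List (Int × Int) := [(0, 1), (1, 0), (-1, 0), (0, -1)]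

-- x_max / y_max; 'risk_levels[0]' raises IndexError on an empty grid (excluded by Pre_),
-- ported as headD [] (exact whenever the grid is nonempty)
def pvXmax (g : List (List Int)) : Int := ((g.headD []).length : Int) - 1
def pvYmax (g : List (List Int)) : Int := (g.length : Int) - 1

-- risk_levels[y][x] (both Pythons use this very expression); the IndexError case
-- (a row shorter than row 0) is excluded by Pre_, the default 0 is never read there
def pvCell (g : List (List Int)) (x y : Int) : Int :=
  (PySem.List.pyGet? ((PySem.List.pyGet? g y).getD []) x).getD 0

-- neighbours: the Python generator is consumed while nodes_to_visit grows by the OTHER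
-- (pairwise distinct) neighbour cells of pos, which can never equal a later candidate,
-- so evaluating all four conditions against the original lists is exact
def pvNeighbours (pos : Int × Int) (visited nodes_to_visit : List (Int × Int))
    (g : List (List Int)) : List (Int × Int) :=
  pvDirs.filterMap (fun d =>
    let q := (pos.1 + d.1, pos.2 + d.2)
    if 0 ≤ q.1 ∧ q.1 ≤ pvXmax g ∧ 0 ≤ q.2 ∧ q.2 ≤ pvYmax g ∧
        q ∉ visited ∧ q ∉ nodes_to_visit
    then some q else none)

-- Python '<' between node risks: 'none' stands for the defaultdict default float('inf')
def pvOLt : Option Int → Option Int → Bool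
  | some a, some b => a < b
  | some _, none => true
  | none, _ => false

-- min(list) : first element, then keep any strictly smaller one (Python's min)
def pvMin (risks : List (Option Int)) : Option Int :=
  match risks with
  | [] => none   -- min([]) is ValueError; unreachable, the loop guard gives a nonempty list
  | r :: rs => rs.foldl (fun m v => if pvOLt v m then v else m) r

-- the while-loop of A; fuel is structural (the supplied fuel always suffices, see the
-- call site), 0 on exhaustion in both ports
def pvALoop (g : List (List Int)) (dest : Int × Int) :
    Nat → List (Int × Int) → List (Int × Int) → PySem.Dict (Int × Int) Int → Int
  | 0, _, _, _ => 0
  | fuel + 1, tv, vis, d =>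
    if 0 < tv.length then
      let risks : List (Option Int) := tv.map (fun p => d.get? p)
      let current := pvMin risks
      let idx := (PySem.List.index? risks current).getD 0   -- current ∈ risks, never none
      let xy := (PySem.List.pyGet? tv (idx : Int)).getD (0, 0)  -- idx < len(tv) by construction
      if xy = dest then
        (d.get? dest).getD 0   -- 'none' would be the float('inf') default: never happens here
      else
        let st := (pvNeighbours xy vis tv g).foldl
          (fun (s : List (Int × Int) × PySem.Dict (Int × Int) Int) q =>
            (s.1 ++ [q],
             if pvOLt (current.map (· + pvCell g q.1 q.2)) (s.2.get? q)
             then s.2.insert q (current.getD 0 + pvCell g q.1 q.2) else s.2))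
          (tv, d)
        pvALoop g dest fuel ((PySem.List.remove? st.1 xy).getD st.1) (vis ++ [xy]) st.2
    else
      -- Python would return node_risks[destination] = float('inf') here (not an Int):
      -- unreachable under Pre_ (the grid box is connected); both ports return 0
      0

def find_path_with_lowest_risk (risk_levels : List (List Int)) : Int :=
  pvALoop risk_levels (pvXmax risk_levels, pvYmax risk_levels)
    (risk_levels.length * (risk_levels.headD []).length + 2)
    [(0, 0)] [] ((PySem.Dict.empty).insert (0, 0) 0)

-- ===== PORT B =====

-- insert (risk, cell) after every entry of risk ≤ (Source B's index scan + insert)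
def pvInsertSorted (front : List (Int × (Int × Int))) (e : Int × (Int × Int)) :
    List (Int × (Int × Int)) :=
  match front with
  | [] => [e]
  | f :: rest => if f.1 ≤ e.1 then f :: pvInsertSorted rest e else e :: f :: rest

def pvBLoop (g : List (List Int)) (xl yl : Int) :
    Nat → List (Int × (Int × Int)) → PySem.Set (Int × Int) → Int
  | 0, _, _ => 0
  | fuel + 1, front, seen =>
    match front with
    | [] => 0   -- Source B's trailing 'return 0' (unreachable under Pre_)
    | (r, p) :: rest =>
      if p = (xl, yl) then r
      else
        let st := pvDirs.foldl
          (fun (s : List (Int × (Int × Int)) × PySem.Set (Int × Int)) d =>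
            let q := (p.1 + d.1, p.2 + d.2)
            if 0 ≤ q.1 ∧ q.1 ≤ xl ∧ 0 ≤ q.2 ∧ q.2 ≤ yl ∧ q ∉ s.2 then
              (pvInsertSorted s.1 (r + pvCell g q.1 q.2, q), PySem.Set.add s.2 q)
            else s)
          (rest, seen)
        pvBLoop g xl yl fuel st.1 st.2

def find_path_with_lowest_risk_alt (risk_levels : List (List Int)) : Int :=
  pvBLoop risk_levels (((risk_levels.headD []).length : Int) - 1)
    ((risk_levels.length : Int) - 1)
    (risk_levels.length * (risk_levels.headD []).length + 2)
    [(0, (0, 0))] (PySem.Set.add PySem.Set.empty (0, 0))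

-- ===== PRECONDITION & SPEC =====

-- Pre_ excludes the empty grid (A raises IndexError on risk_levels[0]), grids whose first
-- row is empty (A returns the non-integer float('inf')), and grids with a row shorter than
-- the first row (A raises IndexError on risk_levels[y][x] — except in accidental cases where
-- the short row's missing cells happen never to be discovered, on which A still returns).
def Pre_find_path_with_lowest_risk (risk_levels : List (List Int)) : Prop :=
  risk_levels ≠ [] ∧ risk_levels.headD [] ≠ [] ∧
    ∀ row ∈ risk_levels, (risk_levels.headD []).length ≤ row.length
instance (risk_levels : List (List Int)) : Decidable (Pre_find_path_with_lowest_risk risk_levels) := by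
  unfold Pre_find_path_with_lowest_risk; infer_instance

def pvWitness_find_path_with_lowest_risk : List (List Int) := [[1, 2], [3, 4]]

def Spec_find_path_with_lowest_risk (risk_levels : List (List Int)) (out : Int) : Prop :=
  out = find_path_with_lowest_risk_alt risk_levels
instance (risk_levels : List (List Int)) (out : Int) :
    Decidable (Spec_find_path_with_lowest_risk risk_levels out) := by
  unfold Spec_find_path_with_lowest_risk; infer_instance

-- ===== CLAIM (what is proved, stated in full; the proofs are below) =====
def Claim_equal_find_path_with_lowest_risk : Prop :=
  ∀ (risk_levels : List (List Int)), Dom_find_path_with_lowest_risk risk_levels →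
    Pre_find_path_with_lowest_risk risk_levels →
    Spec_find_path_with_lowest_risk risk_levels (find_path_with_lowest_risk risk_levels)

-- ===== LEMMAS AND PROOFS =====

-- A's frontier, annotated with the dict risks (0 is never read: every frontier node has a risk)
def pvAnnot (d : PySem.Dict (Int × Int) Int) (tv : List (Int × Int)) :
    List (Int × (Int × Int)) :=
  tv.map (fun p => ((d.get? p).getD 0, p))

-- B's sorted frontier as a function of the multiset of entries
def pvInsort (L : List (Int × (Int × Int))) : List (Int × (Int × Int)) :=
  L.foldl pvInsertSorted []

-- first entry with minimal risk (A's min + index selection)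
def pvFirstMin : List (Int × (Int × Int)) → Option (Int × (Int × Int))
  | [] => none
  | a :: l =>
    match pvFirstMin l with
    | none => some a
    | some b => if b.1 < a.1 then some b else some a

-- the list with that entry removed
def pvRFM : List (Int × (Int × Int)) → List (Int × (Int × Int))
  | [] => []
  | a :: l =>
    match pvFirstMin l with
    | none => []
    | some b => if b.1 < a.1 then a :: pvRFM l else l

theorem pvFirstMin_nil_iff (l : List (Int × (Int × Int))) : pvFirstMin l = none ↔ l = [] := by
  cases l with
  | nil => simp [pvFirstMin]
  | cons a t =>
    simp only [pvFirstMin]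
    cases h : pvFirstMin t <;> simp <;> split_ifs <;> simp

theorem pvFirstMin_snoc (L : List (Int × (Int × Int))) (x : Int × (Int × Int)) :
    pvFirstMin (L ++ [x]) =
      match pvFirstMin L with
      | none => some x
      | some b => if x.1 < b.1 then some x else some b := by
  induction L with
  | nil => rfl
  | cons a l ih =>
    simp only [List.cons_append, pvFirstMin, ih]
    cases h : pvFirstMin l with
    | none => simp only
    | some b =>
      simp only
      by_cases h1 : x.1 < b.1 <;> by_cases h2 : b.1 < a.1 <;>
        simp only [if_pos, if_neg, h1, h2, if_true, if_false] <;>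
        split_ifs <;> first | rfl | omega

theorem pvRFM_snoc (L : List (Int × (Int × Int))) (x : Int × (Int × Int)) :
    pvRFM (L ++ [x]) =
      match pvFirstMin L with
      | none => []
      | some b => if x.1 < b.1 then L else pvRFM L ++ [x] := by
  induction L with
  | nil => rfl
  | cons a l ih =>
    simp only [List.cons_append, pvRFM, pvFirstMin, pvFirstMin_snoc, ih]
    cases h : pvFirstMin l with
    | none =>
      have hl : l = [] := (pvFirstMin_nil_iff l).mp h
      subst hl
      by_cases h1 : x.1 < a.1 <;> simp [h1, pvRFM]
    | some b =>
      simp only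
      by_cases h1 : x.1 < b.1 <;> by_cases h2 : b.1 < a.1 <;>
        simp only [h1, h2, if_true, if_false, if_pos, if_neg] <;>
        (try split_ifs) <;> first | rfl | omega | simp_all | simp

theorem pvInsort_snoc (L : List (Int × (Int × Int))) (x : Int × (Int × Int)) :
    pvInsort (L ++ [x]) = pvInsertSorted (pvInsort L) x := by
  simp [pvInsort, List.foldl_append]

theorem pvInsertSorted_length (S : List (Int × (Int × Int))) (e : Int × (Int × Int)) :
    (pvInsertSorted S e).length = S.length + 1 := by
  induction S with
  | nil => rfl
  | cons f rest ih =>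
    simp only [pvInsertSorted]
    split_ifs <;> simp [ih]

theorem pvInsort_length (L : List (Int × (Int × Int))) :
    (pvInsort L).length = L.length := by
  induction L using List.reverseRecOn with
  | nil => rfl
  | append_singleton L x ih => simp [pvInsort_snoc, pvInsertSorted_length, ih]

theorem pvInsort_head (L : List (Int × (Int × Int))) :
    (pvInsort L).head? = pvFirstMin L := by
  induction L using List.reverseRecOn with
  | nil => rfl
  | append_singleton L x ih =>
    rw [pvInsort_snoc, pvFirstMin_snoc]
    cases h : pvInsort L with
    | nil =>
      rw [h] at ih; simp only [List.head?_nil] at ih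
      rw [← ih]; rfl
    | cons f rest =>
      rw [h] at ih; simp only [List.head?_cons] at ih
      rw [← ih]
      simp only [pvInsertSorted]
      split_ifs with hf <;> simp only [List.head?_cons] <;>
        (try split_ifs) <;> first | rfl | omega

theorem pvInsort_tail (L : List (Int × (Int × Int))) :
    (pvInsort L).tail = pvInsort (pvRFM L) := by
  induction L using List.reverseRecOn with
  | nil => rfl
  | append_singleton L x ih =>
    rw [pvInsort_snoc, pvRFM_snoc]
    cases h : pvInsort L with
    | nil =>
      have hL : L = [] := by
        have := pvInsort_length L; rw [h] at this
        exact List.eq_nil_of_length_eq_zero this.symm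
      subst hL; rfl
    | cons f rest =>
      have hfm : pvFirstMin L = some f := by rw [← pvInsort_head, h]; rfl
      rw [hfm]
      simp only [pvInsertSorted]
      by_cases hle : f.1 ≤ x.1
      · simp only [if_pos hle, if_neg (by omega : ¬ x.1 < f.1), List.tail_cons]
        have hrest : rest = pvInsort (pvRFM L) := by
          rw [← ih, h, List.tail_cons]
        rw [hrest, ← pvInsort_snoc]
      · simp only [if_neg hle, if_pos (by omega : x.1 < f.1), List.tail_cons, ← h]

theorem pvFirstMin_mem {L : List (Int × (Int × Int))} {m : Int × (Int × Int)}
    (h : pvFirstMin L = some m) : m ∈ L := by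
  induction L with
  | nil => simp [pvFirstMin] at h
  | cons a l ih =>
    simp only [pvFirstMin] at h
    cases hl : pvFirstMin l with
    | none => rw [hl] at h; simp at h; simp [h]
    | some b =>
      rw [hl] at h
      simp only at h
      split_ifs at h with hb
      · right; exact ih (by rw [hl, ← h])
      · have : a = m := by simpa using h
        subst this; exact List.mem_cons_self ..

-- the annotated frontier with the first-minimal entry's node erased is pvRFM
theorem pvAnnot_cons (d : PySem.Dict (Int × Int) Int) (p : Int × Int) (tv : List (Int × Int)) :
    pvAnnot d (p :: tv) = ((d.get? p).getD 0, p) :: pvAnnot d tv := rfl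

theorem pvAnnot_erase (d : PySem.Dict (Int × Int) Int) (tv : List (Int × Int))
    (m : Int × (Int × Int)) (hnd : tv.Nodup) (hfm : pvFirstMin (pvAnnot d tv) = some m) :
    pvAnnot d (tv.erase m.2) = pvRFM (pvAnnot d tv) := by
  induction tv with
  | nil => simp [pvAnnot, pvFirstMin] at hfm
  | cons p rest ih =>
    have hnd' : rest.Nodup := hnd.of_cons
    have hpn : p ∉ rest := (List.nodup_cons.mp hnd).1
    rw [pvAnnot_cons] at hfm
    simp only [pvFirstMin] at hfm
    cases hl : pvFirstMin (pvAnnot d rest) with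
    | none =>
      have hre : rest = [] := by
        have h0 : pvAnnot d rest = [] := (pvFirstMin_nil_iff _).mp hl
        simpa [pvAnnot] using h0
      subst hre
      rw [hl] at hfm
      simp only at hfm
      have hme : m = ((d.get? p).getD 0, p) := by simpa using hfm.symm
      rw [hme]
      simp [List.erase_cons_head, pvAnnot, pvRFM, pvFirstMin]
    | some b =>
      rw [hl] at hfm
      simp only at hfm
      rw [pvAnnot_cons]
      simp only [pvRFM, hl]
      split_ifs at hfm ⊢ with hb
      · have hmb : m = b := by simpa using hfm.symm
        subst hmb
        have hm2 : m.2 ∈ rest := by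
          have hmem := pvFirstMin_mem hl
          simp only [pvAnnot, List.mem_map] at hmem
          obtain ⟨a, ha, hae⟩ := hmem
          have : a = m.2 := congrArg Prod.snd hae
          exact this ▸ ha
        have hne : ¬ (p == m.2) = true := by
          simp only [beq_iff_eq]
          intro hc; exact hpn (hc ▸ hm2)
        rw [List.erase_cons_tail hne, pvAnnot_cons]
        congr 1
        exact ih hnd' hl
      · have hme : m = ((d.get? p).getD 0, p) := by simpa using hfm.symm
        rw [hme]
        simp [List.erase_cons_head]

theorem pvAnnot_append (d : PySem.Dict (Int × Int) Int) (xs ys : List (Int × Int)) :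
    pvAnnot d (xs ++ ys) = pvAnnot d xs ++ pvAnnot d ys := by
  simp [pvAnnot]

-- annotation only reads the dict at frontier nodes
theorem pvAnnot_congr (d d' : PySem.Dict (Int × Int) Int) (tv : List (Int × Int))
    (h : ∀ p ∈ tv, d'.get? p = d.get? p) : pvAnnot d' tv = pvAnnot d tv := by
  simp only [pvAnnot]
  exact List.map_congr_left (fun p hp => by rw [h p hp])

-- A's risks list is the annotated keys, all 'some'
theorem pvRisks_eq (d : PySem.Dict (Int × Int) Int) (tv : List (Int × Int))
    (h : ∀ p ∈ tv, (d.get? p).isSome) :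
    tv.map (fun p => d.get? p) = (pvAnnot d tv).map (fun e => some e.1) := by
  simp only [pvAnnot, List.map_map]
  exact List.map_congr_left (fun p hp => by
    have := h p hp
    cases hc : d.get? p with
    | none => rw [hc] at this; simp at this
    | some v => simp [hc])

-- min-fold helpers: Python's left-biased two-argument min over int-or-inf
def pvMin2 (a b : Option Int) : Option Int := if pvOLt b a then b else a

def pvFoldMin (a : Option Int) (rs : List (Option Int)) : Option Int :=
  rs.foldl (fun m v => if pvOLt v m then v else m) a

theorem pvMin_cons (r : Option Int) (rs : List (Option Int)) :
    pvMin (r :: rs) = pvFoldMin r rs := rfl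

theorem pvMin2_assoc (a c v : Option Int) :
    pvMin2 (pvMin2 a c) v = pvMin2 a (pvMin2 c v) := by
  rcases a with _ | a <;> rcases c with _ | c <;> rcases v with _ | v <;>
    simp [pvMin2, pvOLt] <;> (try split_ifs) <;> simp_all <;> omega

theorem pvFoldMin_min2 (rs : List (Option Int)) :
    ∀ a c, pvFoldMin (pvMin2 a c) rs = pvMin2 a (pvFoldMin c rs) := by
  induction rs with
  | nil => intro a c; rfl
  | cons v t ih =>
    intro a c
    have h1 : pvFoldMin (pvMin2 a c) (v :: t) = pvFoldMin (pvMin2 (pvMin2 a c) v) t := rfl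
    rw [h1, pvMin2_assoc, ih]
    rfl

theorem pvFoldMin_eq (a : Option Int) (rs : List (Option Int)) (h : rs ≠ []) :
    pvFoldMin a rs = pvMin2 a (pvMin rs) := by
  cases rs with
  | nil => exact absurd rfl h
  | cons c t =>
    have h1 : pvFoldMin a (c :: t) = pvFoldMin (pvMin2 a c) t := rfl
    rw [h1, pvFoldMin_min2, pvMin_cons]

-- Python min/index/get selection = pvFirstMin
theorem pvSelect (L : List (Int × (Int × Int))) (m : Int × (Int × Int))
    (hfm : pvFirstMin L = some m) :
    pvMin (L.map (fun e => some e.1)) = some m.1 ∧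
    (PySem.List.pyGet? (L.map (·.2))
      (((PySem.List.index? (L.map (fun e => some e.1)) (pvMin (L.map (fun e => some e.1)))).getD 0 : Nat) : Int)).getD (0,0)
      = m.2 := by
  induction L generalizing m with
  | nil => simp [pvFirstMin] at hfm
  | cons e l ih =>
    simp only [pvFirstMin] at hfm
    cases hl : pvFirstMin l with
    | none =>
      have hle : l = [] := (pvFirstMin_nil_iff l).mp hl
      subst hle
      rw [hl] at hfm
      simp only at hfm
      have hme : m = e := by simpa using hfm.symm
      subst hme
      constructor
      · rfl
      · rw [List.map_cons, List.map_nil, List.map_cons, List.map_nil]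
        rw [show pvMin [some m.1] = some m.1 from rfl]
        rw [PySem.List.index?_cons_self]
        simp
    | some b =>
      rw [hl] at hfm
      simp only at hfm
      have hlne : l ≠ [] := by
        intro hc; subst hc; simp [pvFirstMin] at hl
      have hmapne : l.map (fun e => some e.1) ≠ [] := by
        simp [hlne]
      obtain ⟨ihm, ihg⟩ := ih b hl
      simp only [List.map_cons]
      have hminc : pvMin (some e.1 :: l.map (fun e => some e.1)) = pvMin2 (some e.1) (some b.1) := by
        rw [pvMin_cons, pvFoldMin_eq _ _ hmapne, ihm]
      split_ifs at hfm with hb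
      · -- the minimum lies in the tail: m = b
        have hmb : m = b := by simpa using hfm.symm
        subst hmb
        have hmin : pvMin (some e.1 :: l.map (fun e => some e.1)) = some m.1 := by
          rw [hminc]; simp [pvMin2, pvOLt, hb]
        refine ⟨hmin, ?_⟩
        rw [hmin]
        rw [PySem.List.index?_cons_of_ne _ (by simp; omega)]
        rw [ihm] at ihg
        rw [PySem.List.index?_eq_idxOf?] at ihg ⊢
        cases hidx : List.idxOf? (some m.1) (l.map (fun e => some e.1)) with
        | none =>
          exfalso
          have hmem : some m.1 ∈ l.map (fun e => some e.1) :=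
            List.mem_map.mpr ⟨m, pvFirstMin_mem hl, rfl⟩
          rw [List.idxOf?_eq_none_iff] at hidx
          exact hidx hmem
        | some j =>
          rw [hidx] at ihg
          simp only [Option.map_some, Option.getD_some] at ihg ⊢
          rw [PySem.List.pyGet?_natCast] at ihg ⊢
          simpa using ihg
      · -- the head is the first minimum: m = e
        have hme : m = e := by simpa using hfm.symm
        rw [hme]
        have hmin : pvMin (some e.1 :: l.map (fun e => some e.1)) = some e.1 := by
          rw [hminc]
          simp only [pvMin2, pvOLt]
          rw [if_neg (by simpa using hb)]
        refine ⟨hmin, ?_⟩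
        rw [hmin, PySem.List.index?_cons_self]
        simp

-- the dict after relaxing a list of fresh distinct nodes
theorem pvDictFold (g : List (List Int)) (cur : Int) (ns : List (Int × Int))
    (d : PySem.Dict (Int × Int) Int) (hnd : ns.Nodup)
    (hfresh : ∀ q ∈ ns, d.get? q = none) :
    (∀ p, p ∉ ns →
      (ns.foldl (fun d2 q =>
        if pvOLt (some (cur + pvCell g q.1 q.2)) (d2.get? q)
        then d2.insert q (cur + pvCell g q.1 q.2) else d2) d).get? p = d.get? p) ∧
    (∀ q ∈ ns,
      (ns.foldl (fun d2 q =>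
        if pvOLt (some (cur + pvCell g q.1 q.2)) (d2.get? q)
        then d2.insert q (cur + pvCell g q.1 q.2) else d2) d).get? q
        = some (cur + pvCell g q.1 q.2)) := by
  induction ns generalizing d with
  | nil => simp
  | cons q0 t ih =>
    have hq0 : d.get? q0 = none := hfresh q0 (by simp)
    have hcond : pvOLt (some (cur + pvCell g q0.1 q0.2)) (d.get? q0) = true := by
      rw [hq0]; rfl
    simp only [List.foldl_cons, hcond, if_pos]
    have hnd' : t.Nodup := hnd.of_cons
    have hq0t : q0 ∉ t := (List.nodup_cons.mp hnd).1
    have hfresh' : ∀ q ∈ t, (d.insert q0 (cur + pvCell g q0.1 q0.2)).get? q = none := by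
      intro q hq
      rw [PySem.Dict.get?_insert_of_ne _ _ (fun hc => hq0t (by rw [← hc]; exact hq))]
      exact hfresh q (by simp [hq])
    obtain ⟨ih1, ih2⟩ := ih (d.insert q0 (cur + pvCell g q0.1 q0.2)) hnd' hfresh'
    constructor
    · intro p hp
      rw [ih1 p (fun hc => hp (by simp [hc]))]
      rw [PySem.Dict.get?_insert_of_ne _ _ (fun hc => hp (by simp [hc]))]
    · intro q hq
      rcases List.mem_cons.mp hq with hq | hq
      · subst hq
        rw [ih1 q hq0t, PySem.Dict.get?_insert_self]
      · exact ih2 q hq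

-- B's direction fold in terms of A's neighbour list (conditions agree through the seen-set;
-- the candidate cells are pairwise distinct, so the growing seen-set never masks one)
theorem pvBFold (g : List (List Int)) (xl yl : Int) (r : Int) (p : Int × Int) :
    ∀ (ds : List (Int × Int)) (vis tv : List (Int × Int))
      (front0 : List (Int × (Int × Int))) (seen0 : PySem.Set (Int × Int)),
    (ds.map (fun d => (p.1 + d.1, p.2 + d.2))).Nodup →
    (∀ q, q ∈ seen0 ↔ q ∈ vis ∨ q ∈ tv) →
    (ds.foldl
      (fun (s : List (Int × (Int × Int)) × PySem.Set (Int × Int)) d =>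
        let q := (p.1 + d.1, p.2 + d.2)
        if 0 ≤ q.1 ∧ q.1 ≤ xl ∧ 0 ≤ q.2 ∧ q.2 ≤ yl ∧ q ∉ s.2 then
          (pvInsertSorted s.1 (r + pvCell g q.1 q.2, q), PySem.Set.add s.2 q)
        else s)
      (front0, seen0)).1 =
      (ds.filterMap (fun d =>
        let q := (p.1 + d.1, p.2 + d.2)
        if 0 ≤ q.1 ∧ q.1 ≤ xl ∧ 0 ≤ q.2 ∧ q.2 ≤ yl ∧ q ∉ vis ∧ q ∉ tv
        then some q else none)).foldl
        (fun fr q => pvInsertSorted fr (r + pvCell g q.1 q.2, q)) front0 ∧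
    (∀ x, x ∈ (ds.foldl
      (fun (s : List (Int × (Int × Int)) × PySem.Set (Int × Int)) d =>
        let q := (p.1 + d.1, p.2 + d.2)
        if 0 ≤ q.1 ∧ q.1 ≤ xl ∧ 0 ≤ q.2 ∧ q.2 ≤ yl ∧ q ∉ s.2 then
          (pvInsertSorted s.1 (r + pvCell g q.1 q.2, q), PySem.Set.add s.2 q)
        else s)
      (front0, seen0)).2 ↔ x ∈ seen0 ∨
        x ∈ ds.filterMap (fun d =>
          let q := (p.1 + d.1, p.2 + d.2)
          if 0 ≤ q.1 ∧ q.1 ≤ xl ∧ 0 ≤ q.2 ∧ q.2 ≤ yl ∧ q ∉ vis ∧ q ∉ tv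
          then some q else none)) := by
  intro ds
  induction ds with
  | nil => intro vis tv front0 seen0 _ _; simp
  | cons d0 t ih =>
    intro vis tv front0 seen0 hnd hseen
    have hnd' : (t.map (fun d => (p.1 + d.1, p.2 + d.2))).Nodup := (List.nodup_cons.mp hnd).2
    have hq0 : (p.1 + d0.1, p.2 + d0.2) ∉ t.map (fun d => (p.1 + d.1, p.2 + d.2)) :=
      (List.nodup_cons.mp hnd).1
    set q0 : Int × Int := (p.1 + d0.1, p.2 + d0.2) with hq0def
    by_cases hcb : 0 ≤ q0.1 ∧ q0.1 ≤ xl ∧ 0 ≤ q0.2 ∧ q0.2 ≤ yl ∧ q0 ∉ seen0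
    · -- accepted: both sides take q0
      have hca : 0 ≤ q0.1 ∧ q0.1 ≤ xl ∧ 0 ≤ q0.2 ∧ q0.2 ≤ yl ∧ q0 ∉ vis ∧ q0 ∉ tv := by
        obtain ⟨h1, h2, h3, h4, h5⟩ := hcb
        have hns := (hseen q0).not
        rw [not_or] at hns
        exact ⟨h1, h2, h3, h4, (hns.mp h5).1, (hns.mp h5).2⟩
      have hseen' : ∀ q, q ∈ PySem.Set.add seen0 q0 ↔ q ∈ vis ∨ q ∈ tv ++ [q0] := by
        intro q
        rw [PySem.Set.mem_add, hseen q]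
        simp only [List.mem_append, List.mem_singleton]
        tauto
      obtain ⟨ih1, ih2⟩ := ih vis (tv ++ [q0])
        (pvInsertSorted front0 (r + pvCell g q0.1 q0.2, q0)) (PySem.Set.add seen0 q0)
        hnd' hseen'
      -- the tail's A-side conditions relative to tv ++ [q0] and to tv coincide:
      -- no later candidate equals q0
      have hfm : t.filterMap (fun d =>
            let q := (p.1 + d.1, p.2 + d.2)
            if 0 ≤ q.1 ∧ q.1 ≤ xl ∧ 0 ≤ q.2 ∧ q.2 ≤ yl ∧ q ∉ vis ∧ q ∉ tv ++ [q0]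
            then some q else none) =
          t.filterMap (fun d =>
            let q := (p.1 + d.1, p.2 + d.2)
            if 0 ≤ q.1 ∧ q.1 ≤ xl ∧ 0 ≤ q.2 ∧ q.2 ≤ yl ∧ q ∉ vis ∧ q ∉ tv
            then some q else none) := by
        apply List.filterMap_congr
        intro d hd
        simp only
        have hne : (p.1 + d.1, p.2 + d.2) ≠ q0 := by
          intro hc
          exact hq0 (hc ▸ List.mem_map.mpr ⟨d, hd, rfl⟩)
        have hmemiff : ((p.1 + d.1, p.2 + d.2) ∉ tv ++ [q0]) ↔ ((p.1 + d.1, p.2 + d.2) ∉ tv) := by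
          simp only [List.mem_append, List.mem_singleton]
          tauto
        by_cases hc1 : 0 ≤ p.1 + d.1 ∧ p.1 + d.1 ≤ xl ∧ 0 ≤ p.2 + d.2 ∧ p.2 + d.2 ≤ yl ∧
            (p.1 + d.1, p.2 + d.2) ∉ vis
        · by_cases hc2 : (p.1 + d.1, p.2 + d.2) ∈ tv
          · rw [if_neg (fun hcon => hcon.2.2.2.2.2 (List.mem_append.mpr (Or.inl hc2))),
              if_neg (fun hcon => hcon.2.2.2.2.2 hc2)]
          · rw [if_pos ⟨hc1.1, hc1.2.1, hc1.2.2.1, hc1.2.2.2.1, hc1.2.2.2.2, hmemiff.mpr hc2⟩,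
              if_pos ⟨hc1.1, hc1.2.1, hc1.2.2.1, hc1.2.2.2.1, hc1.2.2.2.2, hc2⟩]
        · rw [if_neg (by tauto), if_neg (by tauto)]
      simp only [List.foldl_cons, List.filterMap_cons]
      rw [if_pos hcb]
      have hca' : (if 0 ≤ q0.1 ∧ q0.1 ≤ xl ∧ 0 ≤ q0.2 ∧ q0.2 ≤ yl ∧ q0 ∉ vis ∧ q0 ∉ tv
          then some q0 else none) = some q0 := if_pos hca
      rw [hca']
      constructor
      · rw [ih1, hfm, List.foldl_cons]
      · intro x
        rw [ih2 x, hfm]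
        rw [PySem.Set.mem_add]
        simp only [List.mem_cons]
        tauto
    · -- rejected by B
      by_cases hbounds : 0 ≤ q0.1 ∧ q0.1 ≤ xl ∧ 0 ≤ q0.2 ∧ q0.2 ≤ yl
      · have hq0seen : q0 ∈ seen0 := by
          by_contra hc
          exact hcb ⟨hbounds.1, hbounds.2.1, hbounds.2.2.1, hbounds.2.2.2, hc⟩
        have hvt : q0 ∈ vis ∨ q0 ∈ tv := (hseen q0).mp hq0seen
        simp only [List.foldl_cons, List.filterMap_cons]
        rw [if_neg hcb, if_neg (by tauto)]
        exact ih vis tv front0 seen0 hnd' hseen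
      · simp only [List.foldl_cons, List.filterMap_cons]
        rw [if_neg hcb, if_neg (by tauto)]
        exact ih vis tv front0 seen0 hnd' hseen

-- a filterMap that keeps or drops each element is a sublist
theorem pv_filterMap_if_sublist {α : Type} (l : List α) (P : α → Prop) [DecidablePred P] :
    (l.filterMap (fun q => if P q then some q else none)).Sublist l := by
  induction l with
  | nil => simp
  | cons x t ih =>
    simp only [List.filterMap_cons]
    split_ifs <;> simp [ih, List.Sublist.cons]

-- the four neighbour cells of p are pairwise distinct
theorem pvDirs_cells_nodup (p : Int × Int) :
    (pvDirs.map (fun d => (p.1 + d.1, p.2 + d.2))).Nodup := by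
  simp [pvDirs, Prod.ext_iff]

-- A's selection (min over the risks list, index of the first hit, lookup) in goal shape
theorem pvSelect' (d : PySem.Dict (Int × Int) Int) (tv : List (Int × Int))
    (hsome : ∀ p ∈ tv, (d.get? p).isSome) (m : Int × (Int × Int))
    (hfm : pvFirstMin (pvAnnot d tv) = some m) :
    (PySem.List.pyGet? tv
        (((PySem.List.index? (tv.map (fun p => d.get? p))
          (pvMin (tv.map (fun p => d.get? p)))).getD 0 : Nat) : Int)).getD (0,0) = m.2 ∧
    pvMin (tv.map (fun p => d.get? p)) = some m.1 := by
  have h1 := pvRisks_eq d tv hsome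
  have h2 : (pvAnnot d tv).map (·.2) = tv := by
    simp only [pvAnnot, List.map_map]
    have hid : ((fun x : Int × (Int × Int) => x.2) ∘
        fun p : Int × Int => (((d.get? p).getD 0 : Int), p)) = id := rfl
    rw [hid, List.map_id]
  obtain ⟨hm, hg⟩ := pvSelect (pvAnnot d tv) m hfm
  rw [h1]
  rw [h2] at hg
  exact ⟨hg, hm⟩

-- the full bisimulation invariant
def pvInv (g : List (List Int)) (dest : Int × Int) (tv vis : List (Int × Int))
    (d : PySem.Dict (Int × Int) Int) (front : List (Int × (Int × Int)))
    (seen : PySem.Set (Int × Int)) : Prop :=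
  front = pvInsort (pvAnnot d tv) ∧
  (∀ p ∈ tv, (d.get? p).isSome) ∧
  (∀ q, q ∈ seen ↔ q ∈ vis ∨ q ∈ tv) ∧
  tv.Nodup ∧
  (∀ q, (d.get? q).isSome → q ∈ vis ∨ q ∈ tv) ∧
  dest ∉ vis

theorem pvMain (g : List (List Int)) (dest : Int × Int)
    (hdx : dest.1 = pvXmax g) (hdy : dest.2 = pvYmax g) :
    ∀ (fuel : Nat) (tv vis : List (Int × Int)) (d : PySem.Dict (Int × Int) Int)
      (front : List (Int × (Int × Int))) (seen : PySem.Set (Int × Int)),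
      pvInv g dest tv vis d front seen →
      pvALoop g dest fuel tv vis d = pvBLoop g dest.1 dest.2 fuel front seen := by
  intro fuel
  induction fuel with
  | zero => intro tv vis d front seen _; rfl
  | succ n ih =>
    intro tv vis d front seen hinv
    obtain ⟨hfr, hsome, hseen, hnd, hdom, hdv⟩ := hinv
    cases tv with
    | nil =>
      have hfe : front = [] := by rw [hfr]; rfl
      rw [hfe]
      simp [pvALoop, pvBLoop]
    | cons p0 tvt =>
      have hlen : 0 < (p0 :: tvt).length := by simp
      have hfl : front.length = (pvAnnot d (p0 :: tvt)).length := by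
        rw [hfr, pvInsort_length]
      rcases hfront : front with _ | ⟨⟨r, pp⟩, rest⟩
      · exfalso
        rw [hfront] at hfl
        simp [pvAnnot] at hfl
      · rw [hfront] at hfr
        have hfm : pvFirstMin (pvAnnot d (p0 :: tvt)) = some (r, pp) := by
          rw [← pvInsort_head, ← hfr]; rfl
        obtain ⟨hgetv, hminv⟩ := pvSelect' d (p0 :: tvt) hsome (r, pp) hfm
        -- membership facts for the selected entry
        have hppL := pvFirstMin_mem hfm
        have hppmem : pp ∈ p0 :: tvt ∧ d.get? pp = some r := by
          simp only [pvAnnot, List.mem_map] at hppL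
          obtain ⟨a, ha, hae⟩ := hppL
          have ha2 : a = pp := congrArg Prod.snd hae
          subst ha2
          have hs := hsome a ha
          have h := congrArg Prod.fst hae
          cases hc : d.get? a with
          | none => rw [hc] at hs; simp at hs
          | some v =>
            rw [hc] at h
            simp only [Option.getD_some] at h
            exact ⟨ha, congrArg some h⟩
        simp only [pvALoop, pvBLoop, if_pos hlen]
        dsimp only at hgetv hminv
        rw [hgetv, hminv]
        simp only [Option.map_some, Option.getD_some, Prod.mk.eta]
        by_cases hdest : pp = dest
        · rw [if_pos hdest, if_pos hdest]
          rw [← hdest, hppmem.2]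
          rfl
        · rw [if_neg hdest, if_neg hdest]
          -- A's fold splits into the frontier append and the dict relaxation
          set ns := pvNeighbours pp vis (p0 :: tvt) g with hns
          rw [PySem.List.foldl_prod_mk (f := fun (acc : List (Int × Int)) (q : Int × Int) => acc ++ [q])
            (g := fun (d2 : PySem.Dict (Int × Int) Int) (q : Int × Int) =>
              if pvOLt (some (r + pvCell g q.1 q.2)) (d2.get? q)
              then d2.insert q (r + pvCell g q.1 q.2) else d2)]
          rw [PySem.List.foldl_append_singleton_eq_self]
          set d' := ns.foldl (fun d2 q =>
              if pvOLt (some (r + pvCell g q.1 q.2)) (d2.get? q)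
              then d2.insert q (r + pvCell g q.1 q.2) else d2) d with hd'
          -- remove the popped node
          rw [PySem.List.remove?_eq_some_erase _ pp (List.mem_append.mpr (Or.inl hppmem.1))]
          rw [Option.getD_some, List.erase_append_left _ hppmem.1]
          -- ns facts
          have hnsfresh : ∀ q ∈ ns, q ∉ vis ∧ q ∉ p0 :: tvt := by
            intro q hq
            rw [hns, pvNeighbours, List.mem_filterMap] at hq
            obtain ⟨dd, _, hdd⟩ := hq
            dsimp only at hdd
            split_ifs at hdd with hc
            cases hdd
            exact ⟨hc.2.2.2.2.1, hc.2.2.2.2.2⟩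
          have hnsnodup : ns.Nodup := by
            have hcells := pvDirs_cells_nodup pp
            have he1 : ns = (pvDirs.map (fun dd => (pp.1 + dd.1, pp.2 + dd.2))).filterMap
                (fun q => if 0 ≤ q.1 ∧ q.1 ≤ pvXmax g ∧ 0 ≤ q.2 ∧ q.2 ≤ pvYmax g ∧
                    q ∉ vis ∧ q ∉ p0 :: tvt then some q else none) := by
              rw [hns, pvNeighbours, List.filterMap_map]
              rfl
            have hsub : ns.Sublist (pvDirs.map (fun dd => (pp.1 + dd.1, pp.2 + dd.2))) := by
              rw [he1]
              exact pv_filterMap_if_sublist _ _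
            exact hsub.nodup hcells
          have hnsdfresh : ∀ q ∈ ns, d.get? q = none := by
            intro q hq
            obtain ⟨hv, ht⟩ := hnsfresh q hq
            cases hc : d.get? q with
            | none => rfl
            | some v =>
              exfalso
              rcases hdom q (by rw [hc]; rfl) with h | h
              · exact hv h
              · exact ht h
          obtain ⟨hdkeep, hdnew⟩ := pvDictFold g r ns d hnsnodup hnsdfresh
          -- B's fold in terms of ns
          obtain ⟨hB1, hB2⟩ := pvBFold g dest.1 dest.2 r pp pvDirs vis (p0 :: tvt) rest seen
            (pvDirs_cells_nodup pp) hseen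
          have hnsB : pvDirs.filterMap (fun dd =>
              let q := (pp.1 + dd.1, pp.2 + dd.2)
              if 0 ≤ q.1 ∧ q.1 ≤ dest.1 ∧ 0 ≤ q.2 ∧ q.2 ≤ dest.2 ∧ q ∉ vis ∧ q ∉ p0 :: tvt
              then some q else none) = ns := by
            rw [hdx, hdy, hns, pvNeighbours]
          rw [hnsB] at hB1 hB2
          rw [hB1]
          -- assemble the new invariant and recurse
          have herase_mem : ∀ x, x ∈ (p0 :: tvt).erase pp ↔ x ≠ pp ∧ x ∈ p0 :: tvt :=
            fun x => hnd.mem_erase_iff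
          have hXsub : ∀ x ∈ (p0 :: tvt).erase pp, x ∈ p0 :: tvt :=
            fun x hx => ((herase_mem x).mp hx).2
          have hXns : ∀ x ∈ (p0 :: tvt).erase pp, x ∉ ns := by
            intro x hx hc
            exact (hnsfresh x hc).2 (hXsub x hx)
          have hannot : pvAnnot d' ((p0 :: tvt).erase pp ++ ns) =
              pvRFM (pvAnnot d (p0 :: tvt)) ++
                ns.map (fun q => (r + pvCell g q.1 q.2, q)) := by
            rw [pvAnnot_append]
            congr 1
            · rw [pvAnnot_congr d d' _ (fun p hp => hdkeep p (hXns p hp))]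
              exact pvAnnot_erase d (p0 :: tvt) (r, pp) hnd hfm
            · rw [pvAnnot]
              exact List.map_congr_left (fun q hq => by rw [hdnew q hq]; rfl)

          have hfront' : (ns.foldl (fun fr q => pvInsertSorted fr (r + pvCell g q.1 q.2, q)) rest)
              = pvInsort (pvAnnot d' ((p0 :: tvt).erase pp ++ ns)) := by
            rw [hannot, pvInsort, List.foldl_append, ← pvInsort]
            have htl : pvInsort (pvRFM (pvAnnot d (p0 :: tvt))) = rest := by
              rw [← pvInsort_tail, ← hfr]
              rfl
            rw [htl, ← List.foldl_map]
          dsimp only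
          refine ih _ _ _ _ _ ⟨hfront', ?_, ?_, ?_, ?_, ?_⟩
          · -- all frontier nodes have a risk
            intro p hp
            rcases List.mem_append.mp hp with hp | hp
            · rw [hdkeep p (hXns p hp)]
              exact hsome p (hXsub p hp)
            · rw [hdnew p hp]; rfl
          · -- seen = visited ∪ frontier
            intro q
            rw [hB2 q, hseen q]
            have h1 := herase_mem q
            have h2 : q ∈ vis ++ [pp] ↔ q ∈ vis ∨ q = pp := by
              simp only [List.mem_append, List.mem_singleton]
            rw [h2, List.mem_append, h1]
            by_cases hq : q = pp
            · subst hq; simp [hppmem.1]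
            · tauto
          · -- frontier nodes are distinct
            refine (List.Nodup.append (hnd.erase pp) hnsnodup ?_)
            intro x hx
            exact fun hc => (hXns x hx) hc
          · -- every dict key is visited or in the frontier
            intro q hq
            by_cases hqns : q ∈ ns
            · right; exact List.mem_append.mpr (Or.inr hqns)
            · rw [hdkeep q hqns] at hq
              rcases hdom q hq with h | h
              · left; exact List.mem_append.mpr (Or.inl h)
              · by_cases hqp : q = pp
                · left; subst hqp; simp
                · right
                  exact List.mem_append.mpr (Or.inl ((herase_mem q).mpr ⟨hqp, h⟩))
          · -- the destination is never moved to visited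
            intro hc
            rcases List.mem_append.mp hc with h | h
            · exact hdv h
            · simp at h; exact hdest h.symm

-- ===== VERDICT (by name: the statement is the Claim_ definition above) =====
theorem find_path_with_lowest_risk_spec : Claim_equal_find_path_with_lowest_risk := by
  intro g _ _
  unfold Spec_find_path_with_lowest_risk find_path_with_lowest_risk find_path_with_lowest_risk_alt
  refine pvMain g (pvXmax g, pvYmax g) rfl rfl _ [(0,0)] [] _ [(0, (0, 0))] _
    ⟨?_, ?_, ?_, ?_, ?_, ?_⟩
  · rfl
  · intro p hp
    simp only [List.mem_singleton] at hp
    subst hp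
    rw [PySem.Dict.get?_insert_self]
    rfl
  · intro q
    show q ∈ [((0 : Int), (0 : Int))] ↔ q ∈ ([] : List (Int × Int)) ∨ q ∈ [((0 : Int), (0 : Int))]
    simp
  · simp
  · intro q hq
    right
    by_cases hq0 : q = (0, 0)
    · simp [hq0]
    · exfalso
      rw [PySem.Dict.get?_insert_of_ne PySem.Dict.empty 0 hq0] at hq
      simp [PySem.Dict.get?_empty] at hq
  · simp
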